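-- pv_equiv track=rewrite | github.com/MaetSheridan/Shery | minimum supply chain.py | supply_chain_optimization
-- ===== SOURCE A (Python) =====
-- def supply_chain_optimization(cost_matrix):
--     n_warehouses = len(cost_matrix[0])
--     n_suppliers = len(cost_matrix)
--
--     # Initialize a DP table
--     dp = [[float('inf')] * n_warehouses for _ in range(n_suppliers)]
--
--     # Base case: first warehouse costs
--     for i in range(n_suppliers):
--         dp[i][0] = cost_matrix[i][0]
--
--     # Fill the DP table
--     for j in range(1, n_warehouses):
--         for i in range(n_suppliers):
--             dp[i][j] = min(dp[k][j-1] + cost_matrix[i][j] for k in range(n_suppliers))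
--
--     # Find the minimum cost for the last warehouse
--     return min(dp[i][-1] for i in range(n_suppliers))
-- ===== SOURCE B (Python) =====
-- def supply_chain_optimization(cost_matrix):
--     # Each warehouse column is independent: the optimum is the sum of
--     # per-column minima over suppliers.
--     total = 0
--     for j in range(len(cost_matrix[0])):
--         total += min(row[j] for row in cost_matrix)
--     return total
-- ===== Notes on version B (the rewrite author's own statement) =====
-- stated objective: faster
-- what changed: Replaced the O(n_suppliers^2 * n_warehouses) DP table (each cell minimizes over all suppliers of the previous column) with a single pass summing the per-column minimum, since columns are independent.
import Mathlib
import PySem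

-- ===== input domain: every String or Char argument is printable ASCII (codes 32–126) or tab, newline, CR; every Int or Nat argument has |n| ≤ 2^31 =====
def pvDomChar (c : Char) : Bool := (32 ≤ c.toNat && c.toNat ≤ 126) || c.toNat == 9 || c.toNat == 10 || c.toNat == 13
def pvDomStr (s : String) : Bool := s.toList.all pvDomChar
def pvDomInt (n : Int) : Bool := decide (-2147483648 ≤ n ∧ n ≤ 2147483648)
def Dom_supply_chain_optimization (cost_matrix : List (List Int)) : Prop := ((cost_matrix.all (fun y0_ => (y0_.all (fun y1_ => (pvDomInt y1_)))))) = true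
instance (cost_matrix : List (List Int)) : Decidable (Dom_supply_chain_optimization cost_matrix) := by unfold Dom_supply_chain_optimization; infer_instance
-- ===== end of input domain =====

-- B replaces A's quadratic-per-column DP by summing per-column minima (columns are independent); faster asymptotically.

-- ===== PORT A =====
-- Literal port of A. Python list indexing that is always in range under Pre_ is
-- rendered with getD (default values are never read under Pre_); float('inf')
-- initial cells are rendered as 0 — they are overwritten before ever being read.
-- dp[i][-1] is rendered as index (n_w - 1): under Pre_ every dp row has length n_w.
def supply_chain_optimization (cost_matrix : List (List Int)) : Int :=
  let n_w := (cost_matrix.headD []).length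
  let n_s := cost_matrix.length
  let dp0 : List (List Int) := (List.range n_s).map (fun _ => List.replicate n_w (0 : Int))
  -- base case: first warehouse costs
  let dp1 := (List.range n_s).foldl
    (fun dp i => dp.set i ((dp.getD i []).set 0 ((cost_matrix.getD i []).getD 0 0))) dp0
  -- fill the DP table, columns j = 1 .. n_w-1
  let dp2 := ((List.range n_w).drop 1).foldl
    (fun dp j => (List.range n_s).foldl
      (fun dp i => dp.set i ((dp.getD i []).set j
        ((PySem.List.min? ((List.range n_s).map
            (fun k => (dp.getD k []).getD (j-1) 0 + (cost_matrix.getD i []).getD j 0))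
          (fun y => y)).getD 0))) dp) dp1
  (PySem.List.min? ((List.range n_s).map (fun i => (dp2.getD i []).getD (n_w - 1) 0))
    (fun y => y)).getD 0

-- ===== PORT B =====
def supply_chain_optimization_alt (cost_matrix : List (List Int)) : Int :=
  (List.range (cost_matrix.headD []).length).foldl
    (fun total j =>
      total + (PySem.List.min? (cost_matrix.map (fun row => row.getD j 0)) (fun y => y)).getD 0)
    0

-- ===== PRECONDITION & SPEC =====
-- Pre_ excludes exactly the inputs where Python A raises: the empty matrix
-- (cost_matrix[0] → IndexError), an empty first row (dp[i][0] = … → IndexError),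
-- and a row shorter than the first row (cost_matrix[i][j] → IndexError).
def Pre_supply_chain_optimization (cost_matrix : List (List Int)) : Prop :=
  cost_matrix ≠ [] ∧ 0 < (cost_matrix.headD []).length ∧
    ∀ row ∈ cost_matrix, (cost_matrix.headD []).length ≤ row.length
instance (cost_matrix : List (List Int)) : Decidable (Pre_supply_chain_optimization cost_matrix) := by
  unfold Pre_supply_chain_optimization; infer_instance
def pvWitness_supply_chain_optimization : List (List Int) := [[3, 1], [2, 5]]

def Spec_supply_chain_optimization (cost_matrix : List (List Int)) (out : Int) : Prop := out = supply_chain_optimization_alt cost_matrix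
instance (cost_matrix : List (List Int)) (out : Int) : Decidable (Spec_supply_chain_optimization cost_matrix out) := by unfold Spec_supply_chain_optimization; infer_instance

-- ===== CLAIM (what is proved, stated in full; the proofs are below) =====
def Claim_equal_supply_chain_optimization : Prop := ∀ (cost_matrix : List (List Int)), Dom_supply_chain_optimization cost_matrix → Pre_supply_chain_optimization cost_matrix → Spec_supply_chain_optimization cost_matrix (supply_chain_optimization cost_matrix)

-- ===== LEMMAS AND PROOFS =====

def pvStepRow (q : Nat) (w : List (List Int) → Nat → Int) (d : List (List Int)) (i : Nat) : List (List Int) :=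
  d.set i ((d.getD i []).set q (w d i))

def pvW (cm : List (List Int)) (j : Nat) (dp : List (List Int)) (i : Nat) : Int :=
  (PySem.List.min? ((List.range cm.length).map
      (fun k => (dp.getD k []).getD (j-1) 0 + (cm.getD i []).getD j 0))
    (fun y => y)).getD 0

def pvColCM (cm : List (List Int)) (j : Nat) : List Int :=
  (List.range cm.length).map (fun i => (cm.getD i []).getD j 0)

def pvM (cm : List (List Int)) (j : Nat) : Int :=
  (PySem.List.min? (pvColCM cm j) (fun y => y)).getD 0

def pvPre (cm : List (List Int)) : Nat → Int
  | 0 => 0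
  | J+1 => pvPre cm J + pvM cm J

def pvInv (cm : List (List Int)) (J : Nat) (dp : List (List Int)) : Prop :=
  dp.length = cm.length ∧
  (∀ i < cm.length, (dp.getD i []).length = (cm.headD []).length) ∧
  (∀ i < cm.length, (dp.getD i []).getD J 0 = (cm.getD i []).getD J 0 + pvPre cm J)

theorem pv_getD_set_ne {α : Type} (l : List α) (i j : Nat) (a : α) (d : α) (h : i ≠ j) :
    (l.set i a).getD j d = l.getD j d := by
  simp [List.getD_eq_getElem?_getD, List.getElem?_set_ne h]

theorem pv_getD_set_eq {α : Type} (l : List α) (i : Nat) (a : α) (d : α) (h : i < l.length) :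
    (l.set i a).getD i d = a := by
  simp [List.getD_eq_getElem?_getD, h]

theorem pv_map_eq_map_range {α β : Type} (l : List α) (f : α → β) (d : α) :
    l.map f = (List.range l.length).map (fun i => f (l.getD i d)) := by
  apply List.ext_getElem
  · simp
  · intro i h1 h2
    simp only [List.getElem_map, List.getElem_range]
    rw [List.getD_eq_getElem?_getD, List.getElem?_eq_getElem (by simpa using h1)]
    rfl

theorem pv_foldl_min_map (t : List Int) (x c : Int) :
    (t.map (fun y => y + c)).foldl min (x + c) = (t.foldl min x) + c := by
  induction t generalizing x with
  | nil => simp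
  | cons y t ih =>
      simp only [List.map_cons, List.foldl_cons]
      rw [min_add_add_right]
      exact ih (min x y)

theorem pvMinShift (l : List Int) (c : Int) (h : l ≠ []) :
    (PySem.List.min? (l.map (fun x => x + c)) (fun y => y)).getD 0
      = (PySem.List.min? l (fun y => y)).getD 0 + c := by
  cases l with
  | nil => exact absurd rfl h
  | cons x t =>
      rw [List.map_cons, PySem.List.min?_id_cons, PySem.List.min?_id_cons]
      simpa using pv_foldl_min_map t x c

theorem pvFoldSet (q p : Nat) (hqp : q ≠ p)
    (w : List (List Int) → Nat → Int)
    (hw : ∀ d1 d2 i, (∀ k, (d1.getD k []).getD p 0 = (d2.getD k []).getD p 0) → w d1 i = w d2 i)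
    (is : List Nat) (dp : List (List Int)) (hnd : is.Nodup) :
    ((is.foldl (pvStepRow q w) dp).length = dp.length) ∧
    (∀ k, (((is.foldl (pvStepRow q w) dp).getD k []).getD p 0) = (dp.getD k []).getD p 0) ∧
    (∀ i, i ∉ is → (is.foldl (pvStepRow q w) dp).getD i [] = dp.getD i []) ∧
    (∀ i ∈ is, i < dp.length → (is.foldl (pvStepRow q w) dp).getD i [] = (dp.getD i []).set q (w dp i)) ∧
    (∀ k, ((is.foldl (pvStepRow q w) dp).getD k []).length = ((dp.getD k []).length)) := by
  induction is generalizing dp with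
  | nil => simp
  | cons i is ih =>
    obtain ⟨hi, hnd'⟩ := List.nodup_cons.mp hnd
    set d1 := pvStepRow q w dp i with hd1
    have hlen1 : d1.length = dp.length := by simp [hd1, pvStepRow]
    have hrow : ∀ k, d1.getD k [] = if k = i ∧ i < dp.length then (dp.getD i []).set q (w dp i) else dp.getD k [] := by
      intro k
      simp only [hd1, pvStepRow]
      by_cases hk : k = i
      · subst hk
        by_cases hlt : k < dp.length
        · rw [pv_getD_set_eq _ _ _ _ hlt, if_pos ⟨rfl, hlt⟩]
        · rw [List.set_eq_of_length_le (Nat.le_of_not_lt hlt), if_neg (fun h => hlt h.2)]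
      · rw [pv_getD_set_ne _ _ _ _ _ (fun h => hk h.symm), if_neg (fun h => hk h.1)]
    have hcolp : ∀ k, (d1.getD k []).getD p 0 = (dp.getD k []).getD p 0 := by
      intro k; rw [hrow k]; split
      · rename_i h; rw [h.1, pv_getD_set_ne _ _ _ _ _ hqp]
      · rfl
    have hrlen : ∀ k, (d1.getD k []).length = (dp.getD k []).length := by
      intro k; rw [hrow k]; split
      · rename_i h; rw [h.1]; simp
      · rfl
    have hweq : ∀ i', w d1 i' = w dp i' := fun i' => hw _ _ _ hcolp
    obtain ⟨l1, l2, l3, l4, l5⟩ := ih d1 hnd'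
    simp only [List.foldl_cons, ← hd1]
    refine ⟨l1.trans hlen1, fun k => (l2 k).trans (hcolp k), ?_, ?_, fun k => (l5 k).trans (hrlen k)⟩
    · intro i' hni
      rw [l3 i' (fun h => hni (List.mem_cons_of_mem _ h))]
      rw [hrow i']
      split
      · rename_i h; exact absurd h.1 (fun h' => hni (h' ▸ List.mem_cons_self))
      · rfl
    · intro i' hmem hlt
      rcases List.mem_cons.mp hmem with h | h
      · subst h
        rw [l3 i' hi, hrow i']
        simp [hlt]
      · have hne : i' ≠ i := fun h' => hi (h' ▸ h)
        rw [l4 i' h (hlen1 ▸ hlt), hrow i', hweq]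
        simp [hne]

-- column list of cm is nonempty
theorem pvColCM_ne (cm : List (List Int)) (j : Nat) (h : cm ≠ []) : pvColCM cm j ≠ [] := by
  simp [pvColCM, h]

-- inner step: one column
theorem pvInnerStep (cm : List (List Int)) (j : Nat) (hj : 1 ≤ j)
    (hjw : j < (cm.headD []).length) (hcm : cm ≠ [])
    (dp : List (List Int)) (hInv : pvInv cm (j-1) dp) :
    pvInv cm j ((List.range cm.length).foldl (pvStepRow j (pvW cm j)) dp) := by
  obtain ⟨hL, hRL, hC⟩ := hInv
  have hqp : j ≠ j - 1 := by omega
  have hw : ∀ d1 d2 i, (∀ k, (d1.getD k []).getD (j-1) 0 = (d2.getD k []).getD (j-1) 0) →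
      pvW cm j d1 i = pvW cm j d2 i := by
    intro d1 d2 i h
    unfold pvW
    congr 1
    congr 1
    exact List.map_congr_left (fun k _ => by rw [h k])
  obtain ⟨l1, l2, l3, l4, l5⟩ := pvFoldSet j (j-1) hqp (pvW cm j) hw (List.range cm.length) dp (List.nodup_range)
  have hns : 0 < cm.length := List.length_pos_iff.mpr hcm
  refine ⟨l1.trans hL, ?_, ?_⟩
  · intro i hi
    rw [l5 i]; exact hRL i hi
  · intro i hi
    have hmem : i ∈ List.range cm.length := List.mem_range.mpr hi
    rw [l4 i hmem (hL ▸ hi)]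
    have hrl : (dp.getD i []).length = (cm.headD []).length := hRL i hi
    rw [pv_getD_set_eq _ _ _ _ (by rw [hrl]; exact hjw)]
    -- evaluate pvW at dp using the invariant
    have hmap : (List.range cm.length).map
        (fun k => (dp.getD k []).getD (j-1) 0 + (cm.getD i []).getD j 0)
        = (pvColCM cm (j-1)).map (fun x => x + (pvPre cm (j-1) + (cm.getD i []).getD j 0)) := by
      rw [pvColCM, List.map_map]
      refine List.map_congr_left (fun k hk => ?_)
      have hk' := List.mem_range.mp hk
      simp only [Function.comp]
      rw [hC k hk']
      ring
    unfold pvW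
    rw [hmap, pvMinShift _ _ (pvColCM_ne cm (j-1) hcm)]
    have hjeq : j - 1 + 1 = j := by omega
    have : pvPre cm j = pvPre cm (j-1) + pvM cm (j-1) := by
      conv_lhs => rw [← hjeq]
      rfl
    rw [this]
    unfold pvM
    ring

-- outer loop over range' (J+1) t
theorem pvOuter (cm : List (List Int)) (hcm : cm ≠ []) (t : Nat) :
    ∀ (J : Nat) (dp : List (List Int)), J + t < (cm.headD []).length → pvInv cm J dp →
    pvInv cm (J + t) ((List.range' (J+1) t).foldl
      (fun dp j => (List.range cm.length).foldl (pvStepRow j (pvW cm j)) dp) dp) := by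
  induction t with
  | zero => intro J dp _ h; simpa using h
  | succ t ih =>
    intro J dp hb h
    rw [List.range'_succ, List.foldl_cons]
    have h1 : pvInv cm (J+1) ((List.range cm.length).foldl (pvStepRow (J+1) (pvW cm (J+1))) dp) := by
      have := pvInnerStep cm (J+1) (by omega) (by omega) hcm dp (by simpa using h)
      exact this
    have := ih (J+1) _ (by omega) h1
    have harith : J + 1 + t = J + (t+1) := by omega
    rw [harith] at this
    exact this

-- B equals pvPre
theorem pvAltEq (cm : List (List Int)) :
    supply_chain_optimization_alt cm = pvPre cm (cm.headD []).length := by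
  unfold supply_chain_optimization_alt
  generalize (cm.headD []).length = n
  induction n with
  | zero => simp [pvPre]
  | succ n ih =>
    rw [List.range_succ, List.foldl_append]
    simp only [List.foldl_cons, List.foldl_nil, pvPre, ih]
    congr 1
    unfold pvM pvColCM
    rw [pv_map_eq_map_range cm (fun row => row.getD n 0) []]

theorem pvRangeDrop (n : Nat) : (List.range n).drop 1 = List.range' 1 (n-1) := by
  cases n with
  | zero => simp
  | succ m => rw [List.range_eq_range', List.range'_succ]; simp

theorem pvAeq (cm : List (List Int)) : supply_chain_optimization cm =
    (PySem.List.min? ((List.range cm.length).map (fun i =>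
      (((List.range' 1 ((cm.headD []).length - 1)).foldl
        (fun dp j => (List.range cm.length).foldl (pvStepRow j (pvW cm j)) dp)
        ((List.range cm.length).foldl (pvStepRow 0 (fun _ i => (cm.getD i []).getD 0 0))
          ((List.range cm.length).map (fun _ => List.replicate (cm.headD []).length (0:Int))))).getD i []).getD
        ((cm.headD []).length - 1) 0)) (fun y => y)).getD 0 := by
  unfold supply_chain_optimization
  simp only [pvRangeDrop]
  rfl

theorem pvBase (cm : List (List Int)) (hnw : 0 < (cm.headD []).length) :
    pvInv cm 0 ((List.range cm.length).foldl
      (pvStepRow 0 (fun _ i => (cm.getD i []).getD 0 0))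
      ((List.range cm.length).map (fun _ => List.replicate (cm.headD []).length (0:Int)))) := by
  obtain ⟨l1, l2, l3, l4, l5⟩ := pvFoldSet 0 1 (by omega)
    (fun _ i => (cm.getD i []).getD 0 0) (fun _ _ _ _ => rfl)
    (List.range cm.length)
    ((List.range cm.length).map (fun _ => List.replicate (cm.headD []).length (0:Int)))
    List.nodup_range
  have hdp0 : ∀ i < cm.length,
      (((List.range cm.length).map (fun _ => List.replicate (cm.headD []).length (0:Int))).getD i [])
        = List.replicate (cm.headD []).length (0:Int) := by
    intro i hi
    exact PySem.List.getD_map_range _ _ _ _ hi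
  refine ⟨by simpa using l1, ?_, ?_⟩
  · intro i hi
    rw [l5 i, hdp0 i hi]
    simp
  · intro i hi
    rw [l4 i (List.mem_range.mpr hi) (by simpa using hi), hdp0 i hi]
    rw [pv_getD_set_eq _ _ _ _ (by simpa using hnw)]
    simp [pvPre]

theorem pvMain (cm : List (List Int)) (h1 : cm ≠ []) (h2 : 0 < (cm.headD []).length) :
    supply_chain_optimization cm = supply_chain_optimization_alt cm := by
  rw [pvAeq, pvAltEq]
  have hInv := pvOuter cm h1 ((cm.headD []).length - 1) 0 _ (by omega) (pvBase cm h2)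
  simp only [Nat.zero_add] at hInv
  obtain ⟨hL, hRL, hC⟩ := hInv
  have hmap : (List.range cm.length).map (fun i =>
      (((List.range' 1 ((cm.headD []).length - 1)).foldl
        (fun dp j => (List.range cm.length).foldl (pvStepRow j (pvW cm j)) dp)
        ((List.range cm.length).foldl (pvStepRow 0 (fun _ i => (cm.getD i []).getD 0 0))
          ((List.range cm.length).map (fun _ => List.replicate (cm.headD []).length (0:Int))))).getD i []).getD
        ((cm.headD []).length - 1) 0)
      = (pvColCM cm ((cm.headD []).length - 1)).map (fun x => x + pvPre cm ((cm.headD []).length - 1)) := by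
    rw [pvColCM, List.map_map]
    refine List.map_congr_left (fun k hk => ?_)
    simp only [Function.comp]
    rw [hC k (List.mem_range.mp hk)]
  rw [hmap, pvMinShift _ _ (pvColCM_ne _ _ h1)]
  have he : (cm.headD []).length - 1 + 1 = (cm.headD []).length := by omega
  conv_rhs => rw [← he]
  simp only [pvPre, pvM]
  ring

-- ===== VERDICT (by name: the statement is the Claim_ definition above) =====
theorem supply_chain_optimization_spec : Claim_equal_supply_chain_optimization := by
  intro cm _ hP
  unfold Pre_supply_chain_optimization at hP
  unfold Spec_supply_chain_optimization
  exact pvMain cm hP.1 hP.2.1
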